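-- pv_equiv track=rewrite | github.com/Johnnas12/competitive-programming | basics/convert_array.py | convert_better
-- ===== SOURCE A (Python) =====
-- def convert_better(arr):
--     # creating temporary array and copy over all the elements of original lists
--     tmp = [arr[i] for i in range(len(arr))]
--     # use builtin sort function
--     tmp.sort()
--     # creating empty hash table
--     umap = {}
--     # initializing the value increases as we go from left to right
--     val = 0
--     # loop through all elements and increament the val and assign the key(the original number) their order
--     for i in range (len(tmp)):
--         umap[tmp[i]] = val
--         val += 1
--
--     # maping the hash value to arr it just replacing the values with their rank
--     for i in range (len(arr)):
--         arr[i] = umap[arr[i]]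
--
--     return arr
-- ===== SOURCE B (Python) =====
-- def convert_better(arr):
--     # Rank of x = (number of elements <= x) - 1; duplicates all get the
--     # largest sorted index among equals, exactly as A's last-wins dict.
--     ranks = [sum(1 for y in arr if y <= x) - 1 for x in arr]
--     arr[:] = ranks
--     return arr
-- ===== Notes on version B (the rewrite author's own statement) =====
-- stated objective: alternative
-- what changed: Replaces A's sort + hash-map rank table with a direct two-line counting rule: each element's rank is (number of elements <= it) - 1, computed by a comprehension; no sorting and no dictionary.
import Mathlib
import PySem

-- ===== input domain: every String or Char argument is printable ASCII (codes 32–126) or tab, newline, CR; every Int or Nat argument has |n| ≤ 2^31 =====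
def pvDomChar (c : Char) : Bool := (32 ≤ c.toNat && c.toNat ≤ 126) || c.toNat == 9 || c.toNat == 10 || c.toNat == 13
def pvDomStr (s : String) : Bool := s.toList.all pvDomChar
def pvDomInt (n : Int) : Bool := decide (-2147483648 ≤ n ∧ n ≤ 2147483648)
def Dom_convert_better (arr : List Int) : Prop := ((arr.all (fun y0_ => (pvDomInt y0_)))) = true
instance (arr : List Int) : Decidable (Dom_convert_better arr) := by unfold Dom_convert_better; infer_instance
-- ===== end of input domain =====

-- B replaces A's sort + hash-map rank table with a direct counting rule (rank = #{y ≤ x} - 1);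
-- equivalence is about the RETURN value: both Pythons also overwrite `arr` in place with that value.

-- ===== PORT A =====
def convert_better (arr : List Int) : List Int :=
  -- tmp = [arr[i] for i in range(len(arr))]   (indices in range, so pyGetD's default is never used)
  let tmp := (PySem.List.pyRange 0 (arr.length : Int) 1).map (fun i => PySem.List.pyGetD arr i 0)
  -- tmp.sort()
  let tmp2 := PySem.List.sorted tmp (fun x => x) false
  -- umap = {}; val = 0; for i in range(len(tmp)): umap[tmp[i]] = val; val += 1
  let st := (PySem.List.pyRange 0 (tmp2.length : Int) 1).foldl
      (fun (st : PySem.Dict Int Int × Int) i =>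
        (st.1.insert (PySem.List.pyGetD tmp2 i 0) st.2, st.2 + 1))
      (PySem.Dict.empty, 0)
  -- for i in range(len(arr)): arr[i] = umap[arr[i]]   (every arr[i] is a key of umap, so no KeyError;
  -- the .getD 0 on the lookup is never the default)
  (PySem.List.pyRange 0 (arr.length : Int) 1).map
    (fun i => ((st.1.get? (PySem.List.pyGetD arr i 0)).getD 0))

-- ===== PORT B =====
def convert_better_alt (arr : List Int) : List Int :=
  -- ranks = [sum(1 for y in arr if y <= x) - 1 for x in arr]
  arr.map (fun x => ((arr.countP (fun y => decide (y ≤ x)) : Int) - 1))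

-- ===== PRECONDITION & SPEC =====
def Spec_convert_better (arr : List Int) (out : List Int) : Prop := out = convert_better_alt arr
instance (arr : List Int) (out : List Int) : Decidable (Spec_convert_better arr out) := by unfold Spec_convert_better; infer_instance

-- ===== CLAIM (what is proved, stated in full; the proofs are below) =====
def Claim_equal_convert_better : Prop := ∀ (arr : List Int), Dom_convert_better arr → Spec_convert_better arr (convert_better arr)

-- ===== LEMMAS AND PROOFS =====

-- the dict-building loop of A, over the already-sorted list, as a plain fold
def pvRankFold (s : List Int) (st : PySem.Dict Int Int × Int) : PySem.Dict Int Int × Int :=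
  s.foldl (fun st y => (st.1.insert y st.2, st.2 + 1)) st

theorem pvRankFold_snd (s : List Int) (d : PySem.Dict Int Int) (v : Int) :
    (pvRankFold s (d, v)).2 = v + s.length := by
  induction s generalizing d v with
  | nil => simp [pvRankFold]
  | cons a t ih => simp [pvRankFold, List.foldl_cons] at *; rw [ih]; ring

theorem pvRankFold_get (s : List Int) (x : Int)
    (hs : s.Pairwise (· ≤ ·)) (hx : x ∈ s) (d : PySem.Dict Int Int) (v : Int) :
    (pvRankFold s (d, v)).1.get? x
      = some (v + (s.countP (fun y => decide (y ≤ x)) : Int) - 1) := by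
  induction s using List.reverseRecOn generalizing d v with
  | nil => simp at hx
  | append_singleton l y ih =>
    have hfold : pvRankFold (l ++ [y]) (d, v)
        = ((pvRankFold l (d, v)).1.insert y (pvRankFold l (d, v)).2,
           (pvRankFold l (d, v)).2 + 1) := by
      simp [pvRankFold, List.foldl_append]
    have hle : ∀ a ∈ l, a ≤ y := by
      intro a ha
      exact (List.pairwise_append.mp hs).2.2 a ha y (List.mem_singleton_self y)
    by_cases hxy : x = y
    · subst hxy
      rw [hfold, PySem.Dict.get?_insert_self, pvRankFold_snd]
      have hcl : l.countP (fun y => decide (y ≤ x)) = l.length :=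
        List.countP_eq_length.mpr (by intro a ha; simpa using hle a ha)
      rw [List.countP_append, hcl]
      simp
      ring
    · have hxl : x ∈ l := by
        rcases List.mem_append.mp hx with h | h
        · exact h
        · simp at h; exact absurd h hxy
      rw [hfold, PySem.Dict.get?_insert, if_neg hxy,
          ih (List.Pairwise.sublist (List.sublist_append_left l [y]) hs) hxl]
      have hny : ¬ (y ≤ x) := by
        intro h
        exact hxy (le_antisymm (hle x hxl) h)
      rw [List.countP_append]
      simp [hny]

theorem pvMapGet (arr : List Int) (g : Int → Int) :
    (PySem.List.pyRange 0 (arr.length : Int) 1).map (fun i => g (PySem.List.pyGetD arr i 0))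
      = arr.map g := by
  conv_rhs => rw [← PySem.List.map_pyGetD_pyRange_zero' arr 0]
  rw [List.map_map]
  rfl

-- ===== VERDICT (by name: the statement is the Claim_ definition above) =====
theorem convert_better_spec : Claim_equal_convert_better := by
  intro arr _
  unfold Spec_convert_better convert_better convert_better_alt
  -- the copy comprehension is arr itself
  rw [PySem.List.map_pyGetD_pyRange_zero' arr 0]
  dsimp only
  -- the dict-building loop over indices is pvRankFold over the sorted list
  rw [show
      (PySem.List.pyRange 0 ((PySem.List.sorted arr (fun x => x) false).length : Int) 1).foldl
        (fun (st : PySem.Dict Int Int × Int) i =>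
          (st.1.insert (PySem.List.pyGetD (PySem.List.sorted arr (fun x => x) false) i 0) st.2,
           st.2 + 1))
        (PySem.Dict.empty, 0)
      = pvRankFold (PySem.List.sorted arr (fun x => x) false) (PySem.Dict.empty, 0) from
    PySem.List.foldl_pyRange_zero_pyGetD' (PySem.List.sorted arr (fun x => x) false) 0
      (fun (st : PySem.Dict Int Int × Int) (y : Int) => (st.1.insert y st.2, st.2 + 1))
      (PySem.Dict.empty, 0)]
  -- the final write-back loop is a map over arr
  rw [pvMapGet arr (fun x =>
      ((pvRankFold (PySem.List.sorted arr (fun x => x) false)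
          (PySem.Dict.empty, 0)).1.get? x).getD 0)]
  apply List.map_congr_left
  intro x hx
  have hsorted : (PySem.List.sorted arr (fun x => x) false).Pairwise (· ≤ ·) := by
    simpa using PySem.List.sorted_pairwise arr (fun x => x)
  have hmem : x ∈ PySem.List.sorted arr (fun x => x) false :=
    (PySem.List.mem_sorted _ _ _ _).mpr hx
  rw [pvRankFold_get _ x hsorted hmem PySem.Dict.empty 0]
  have hperm : (PySem.List.sorted arr (fun x => x) false).Perm arr :=
    PySem.List.sorted_perm arr (fun x => x) false
  rw [hperm.countP_eq]
  simp
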